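-- pv_equiv track=rewrite | github.com/abyssoffreedom/FIT9136-Ass2 | A2/variable_renaming_rename.py | collect_variables
-- ===== SOURCE A (Python) =====
-- import keyword
--
-- def collect_variables(program):
--     """
--     Collect variables inside the user-entered program.
--     """
--
--     valid_signs = "abcdefghijklmnopqrstuvwxyzABCDEFGHIJKLMNOPQRSTUVWXYZ"
--     variables_list = []
--     #Each line in the program is a string.
--     for line in program:
--         #split() actually deletes all whitespaces in the string and turn it into a list of words.
--         words_list = line.split()
--         for word in words_list:
--             # Check the validation and uniqueness of the variable name
--             if word[0] in valid_signs and word not in keyword.kwlist and word not in variables_list: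
--                 variables_list.append(word)
--     variables_list.sort()
--     return variables_list
-- ===== SOURCE B (Python) =====
-- KEYWORDS = ('False', 'None', 'True', 'and', 'as', 'assert', 'async', 'await',
--             'break', 'class', 'continue', 'def', 'del', 'elif', 'else',
--             'except', 'finally', 'for', 'from', 'global', 'if', 'import',
--             'in', 'is', 'lambda', 'nonlocal', 'not', 'or', 'pass', 'raise',
--             'return', 'try', 'while', 'with', 'yield')
--
--
-- def collect_variables(program):
--     """
--     Collect variables inside the user-entered program.
--     """
--     valid_signs = "abcdefghijklmnopqrstuvwxyzABCDEFGHIJKLMNOPQRSTUVWXYZ"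
--     words = [word for line in program for word in line.split()
--              if word[0] in valid_signs and word not in KEYWORDS]
--     words.sort()
--     result = []
--     for word in words:
--         if not result or word != result[-1]:
--             result.append(word)
--     return result
-- ===== Notes on version B (the rewrite author's own statement) =====
-- stated objective: faster
-- what changed: B collects all valid words with duplicates in one flat pass, sorts the full list once, and removes duplicates by a single adjacency scan over the sorted list, instead of A's linear membership scan of the growing result list for every word.
import Mathlib
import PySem

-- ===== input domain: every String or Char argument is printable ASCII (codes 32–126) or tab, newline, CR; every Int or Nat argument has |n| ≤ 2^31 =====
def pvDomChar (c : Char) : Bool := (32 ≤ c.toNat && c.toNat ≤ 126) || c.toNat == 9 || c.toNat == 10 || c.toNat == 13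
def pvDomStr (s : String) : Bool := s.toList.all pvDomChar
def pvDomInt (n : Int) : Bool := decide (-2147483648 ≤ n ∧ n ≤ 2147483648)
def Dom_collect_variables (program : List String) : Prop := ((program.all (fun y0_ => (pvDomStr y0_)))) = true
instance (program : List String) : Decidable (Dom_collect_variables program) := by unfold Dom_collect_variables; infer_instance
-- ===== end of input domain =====

-- B replaces A's per-word membership scan of the growing result by sort-then-adjacent-dedup (objective: faster; return value only).

-- ===== PORT A =====
def pvValidSigns : List Char := "abcdefghijklmnopqrstuvwxyzABCDEFGHIJKLMNOPQRSTUVWXYZ".toList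

def pvKwlist : List String :=
  ["False", "None", "True", "and", "as", "assert", "async", "await", "break",
   "class", "continue", "def", "del", "elif", "else", "except", "finally",
   "for", "from", "global", "if", "import", "in", "is", "lambda", "nonlocal",
   "not", "or", "pass", "raise", "return", "try", "while", "with", "yield"]

-- word[0] in valid_signs: split() yields only nonempty words, so pyGet? is some; the
-- one-char-substring test equals char membership here (exact on this use).
def pvFirstOk (w : String) : Bool :=
  match PySem.Str.pyGet? w 0 with
  | some c => pvValidSigns.contains c
  | none => false

def collect_variables (program : List String) : List String :=
  let variables_list := program.foldl (fun acc line =>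
    (PySem.Str.split₀ line).foldl (fun acc word =>
      if pvFirstOk word && !pvKwlist.contains word && !acc.contains word
      then acc ++ [word] else acc) acc) []
  PySem.List.sorted variables_list (fun x => x) false

-- ===== PORT B =====
def collect_variables_alt (program : List String) : List String :=
  let words := program.flatMap (fun line =>
    (PySem.Str.split₀ line).filter (fun word => pvFirstOk word && !pvKwlist.contains word))
  let ws := PySem.List.sorted words (fun x => x) false
  ws.foldl (fun result word =>
    if result.isEmpty || PySem.List.pyGet? result (-1) ≠ some word
    then result ++ [word] else result) []

-- ===== PRECONDITION & SPEC =====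
def Spec_collect_variables (program : List String) (out : List String) : Prop := out = collect_variables_alt program
instance (program : List String) (out : List String) : Decidable (Spec_collect_variables program out) := by unfold Spec_collect_variables; infer_instance

-- ===== CLAIM (what is proved, stated in full; the proofs are below) =====
def Claim_equal_collect_variables : Prop := ∀ (program : List String), Dom_collect_variables program → Spec_collect_variables program (collect_variables program)

-- ===== LEMMAS AND PROOFS =====

-- In a strictly increasing list, every element is at most the last.
theorem le_getLast_of_pairwise_lt (l : List String) (h : l.Pairwise (· < ·)) (a : String)
    (ha : a ∈ l) (hne : l ≠ []) : a ≤ l.getLast hne := by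
  induction l with
  | nil => simp at ha
  | cons x xs ih =>
    cases xs with
    | nil => simp at ha; simp [ha, List.getLast]
    | cons y ys =>
      rw [List.getLast_cons (by simp)]
      rcases List.mem_cons.mp ha with h1 | h1
      · subst h1
        exact le_of_lt ((List.pairwise_cons.mp h).1 _ (List.getLast_mem (by simp)))
      · exact ih (List.pairwise_cons.mp h).2 h1 (by simp)

-- A's conditional append is exactly Set.add restricted to pred-passing words.
theorem foldA_eq_set_fold (p : String → Bool) (ws : List String) (acc : List String) :
    ws.foldl (fun acc w => if p w && !acc.contains w then acc ++ [w] else acc) acc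
      = (ws.filter p).foldl PySem.Set.add acc := by
  induction ws generalizing acc with
  | nil => rfl
  | cons w ws ih =>
    simp only [List.foldl_cons, List.filter_cons]
    by_cases hp : p w
    · rw [if_pos hp]
      have h1 : (if (p w && !acc.contains w) = true then acc ++ [w] else acc)
          = PySem.Set.add acc w := by
        by_cases hm : acc.contains w
        all_goals simp only [PySem.Set.add, PySem.Set.contains, hp, hm, Bool.true_and,
          Bool.not_true, Bool.not_false, if_true, if_false] <;> simp [hm]
      rw [List.foldl_cons, h1, ih]
    · rw [if_neg hp]
      rw [if_neg (c := (p w && !acc.contains w) = true) (by simp [hp])]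
      exact ih acc

theorem destutter_invariant (ls : List String) : ∀ (res : List String),
    ls.Pairwise (fun a b => a ≤ b) →
    res.Pairwise (· < ·) →
    (∀ y ∈ res, ∀ x ∈ ls, y ≤ x) →
    (ls.foldl (fun result word =>
        if result.isEmpty || PySem.List.pyGet? result (-1) ≠ some word
        then result ++ [word] else result) res).Pairwise (· < ·)
    ∧ (∀ a, a ∈ ls.foldl (fun result word =>
        if result.isEmpty || PySem.List.pyGet? result (-1) ≠ some word
        then result ++ [word] else result) res ↔ a ∈ res ∨ a ∈ ls) := by
  induction ls with
  | nil =>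
    intro res _ hr _
    simp only [List.foldl_nil]
    exact ⟨hr, fun a => by simp⟩
  | cons w ls ih =>
    intro res hs hr hle
    simp only [List.foldl_cons]
    by_cases hc : (res.isEmpty || decide (PySem.List.pyGet? res (-1) ≠ some w)) = true
    · -- append w
      rw [if_pos hc]
      have hr' : (res ++ [w]).Pairwise (· < ·) := by
        refine List.pairwise_append.2 ⟨hr, List.pairwise_singleton _ _, ?_⟩
        intro y hy x hx
        rw [show x = w from by simpa using hx]
        have hyw : y ≤ w := hle y hy w (by simp)
        rcases lt_or_eq_of_le hyw with hlt | heq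
        · exact hlt
        · exfalso
          have hne : res ≠ [] := List.ne_nil_of_mem hy
          have h1 : y ≤ res.getLast hne := le_getLast_of_pairwise_lt res hr y hy hne
          have h2 : res.getLast hne ≤ w := hle _ (List.getLast_mem hne) w (by simp)
          have h3 : res.getLast hne = w := le_antisymm h2 (heq ▸ h1)
          have hlast : PySem.List.pyGet? res (-1) = some w := by
            rw [PySem.List.pyGet?_neg_one, List.getLast?_eq_some_getLast (l := res) hne, h3]
          simp [List.isEmpty_iff, hne, hlast] at hc
      have hle' : ∀ y ∈ res ++ [w], ∀ x ∈ ls, y ≤ x := by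
        intro y hy x hx
        rcases List.mem_append.mp hy with h | h
        · exact hle y h x (by simp [hx])
        · rw [show y = w from by simpa using h]
          exact (List.pairwise_cons.mp hs).1 x hx
      have hmain := ih (res ++ [w]) (List.pairwise_cons.mp hs).2 hr' hle'
      refine ⟨hmain.1, fun a => ?_⟩
      rw [hmain.2 a]
      simp [List.mem_append, or_assoc]
    · -- skip: w is already the last element of res
      rw [if_neg hc]
      have hsome : PySem.List.pyGet? res (-1) = some w := by
        by_contra hne2
        exact hc (by simp [hne2])
      have hw : w ∈ res := by
        rw [PySem.List.pyGet?_neg_one] at hsome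
        have hne : res ≠ [] := by intro h; rw [h] at hsome; simp at hsome
        rw [List.getLast?_eq_some_getLast (l := res) hne] at hsome
        rw [← Option.some_injective _ hsome]
        exact List.getLast_mem hne
      have hle' : ∀ y ∈ res, ∀ x ∈ ls, y ≤ x := fun y hy x hx => hle y hy x (by simp [hx])
      have hmain := ih res (List.pairwise_cons.mp hs).2 hr hle'
      refine ⟨hmain.1, fun a => ?_⟩
      rw [hmain.2 a]
      constructor
      · tauto
      · rintro (h | h)
        · exact Or.inl h
        · rcases List.mem_cons.mp h with h | h
          · rw [h]; exact Or.inl hw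
          · exact Or.inr h

-- A's whole accumulation equals Set.ofList of the filtered flat word list.
theorem foldA_eq_ofList (program : List String) (p : String → Bool) :
    program.foldl (fun acc line =>
      (PySem.Str.split₀ line).foldl (fun acc w => if p w && !acc.contains w then acc ++ [w] else acc) acc) []
    = PySem.Set.ofList (program.flatMap (fun line => (PySem.Str.split₀ line).filter p)) := by
  rw [PySem.Set.ofList_eq_foldl]
  induction program with
  | nil => rfl
  | cons l ls ih =>
    simp only [List.foldl_cons, List.flatMap_cons, List.foldl_append]
    rw [foldA_eq_set_fold]
    generalize ((PySem.Str.split₀ l).filter p).foldl PySem.Set.add [] = acc0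
    clear ih
    induction ls generalizing acc0 with
    | nil => rfl
    | cons m ms ih2 =>
      simp only [List.foldl_cons, List.flatMap_cons, List.foldl_append]
      rw [foldA_eq_set_fold, ih2]

-- ===== VERDICT (by name: the statement is the Claim_ definition above) =====
theorem collect_variables_spec : Claim_equal_collect_variables := by
  intro program _
  unfold Spec_collect_variables collect_variables collect_variables_alt
  set p := fun w => pvFirstOk w && !pvKwlist.contains w with hp
  set words := program.flatMap (fun line => (PySem.Str.split₀ line).filter p) with hw
  rw [foldA_eq_ofList program p]
  have hs : (PySem.List.sorted words (fun x => x) false).Pairwise (fun a b => a ≤ b) :=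
    PySem.List.sorted_pairwise _ _
  have hinv := destutter_invariant (PySem.List.sorted words (fun x => x) false) []
    hs List.Pairwise.nil (by intro y hy; simp at hy)
  set D := (PySem.List.sorted words (fun x => x) false).foldl (fun result word =>
        if result.isEmpty || PySem.List.pyGet? result (-1) ≠ some word
        then result ++ [word] else result) [] with hD
  have hnodupD : D.Nodup := hinv.1.imp (fun h => ne_of_lt h)
  have hperm : D.Perm (PySem.Set.ofList words) := by
    refine (List.perm_ext_iff_of_nodup hnodupD (PySem.Set.nodup_ofList _)).2 ?_
    intro a
    rw [hinv.2 a]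
    simp [PySem.Set.mem_ofList, PySem.List.mem_sorted]
  exact PySem.List.sorted_eq_of_perm_of_pairwise_lt _ _ _ hperm hinv.1
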